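-- pv_equiv track=rewrite | github.com/maxcohen31/Codewars-Solutions | Codewars/Previous_multiple_of_three_7_kyu.py | prev_mult_of_three
-- ===== SOURCE A (Python) =====
-- def prev_mult_of_three(n: int):
--     if n % 3 == 0:
--         return n
--     else:
--         try:
--             number = [i for i in str(n)[:-1]]
--             return prev_mult_of_three(int(''.join(number)))
--         except ValueError:
--             return None
-- ===== SOURCE B (Python) =====
-- def prev_mult_of_three(n):
--     # strip trailing decimal digits arithmetically until a multiple of 3 remains
--     while n % 3 != 0:
--         if -10 < n < 10:
--             return None
--         q = abs(n) // 10
--         n = q if n > 0 else -q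
--     return n
-- ===== Notes on version B (the rewrite author's own statement) =====
-- stated objective: alternative
-- what changed: A repeatedly converts the number to a string, slices off the last character and re-parses it recursively; B is an iterative integer-arithmetic loop that strips the last decimal digit by integer division of the absolute value by ten (no strings at all), returning None when a lone last digit that is still no multiple of three would have to be stripped.
import Mathlib
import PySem

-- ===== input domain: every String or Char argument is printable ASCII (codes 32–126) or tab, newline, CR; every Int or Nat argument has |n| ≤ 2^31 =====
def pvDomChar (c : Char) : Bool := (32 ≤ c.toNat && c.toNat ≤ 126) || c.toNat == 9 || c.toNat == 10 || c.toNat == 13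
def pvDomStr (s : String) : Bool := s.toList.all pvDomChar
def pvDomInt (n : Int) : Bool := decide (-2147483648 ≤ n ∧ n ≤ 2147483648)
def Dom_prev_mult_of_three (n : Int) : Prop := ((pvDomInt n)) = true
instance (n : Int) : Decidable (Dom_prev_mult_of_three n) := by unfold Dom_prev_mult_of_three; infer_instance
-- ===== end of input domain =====

-- B re-implements the repeated "parse str(n), slice, re-parse" recursion of A as pure integer
-- arithmetic (strip the last decimal digit of |n|); equal return values, no string handling at all.

-- ===== PORT A =====
-- The lemmas pv_* below are needed by port A's decreasing_by (termination of A's recursion);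
-- pv_parse_slice characterises what int(str(n)[:-1]) returns, via the digit-string roundtrip.


theorem pv_nospace (c : Char) (h : c.isDigit = true ∨ c = '-') : PySem.Int.isIntSpace c = false := by
  simp only [PySem.Int.isIntSpace, Bool.or_eq_false_iff, decide_eq_false_iff_not]
  refine ⟨⟨⟨⟨⟨?_, ?_⟩, ?_⟩, ?_⟩, ?_⟩, ?_⟩ <;> rintro rfl <;>
    rcases h with h | h <;> simp_all [Char.isDigit]

theorem pv_dropWhile_id {p : Char → Bool} (l : List Char) (h : ∀ c ∈ l, p c = false) :
    List.dropWhile p l = l := by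
  cases l with
  | nil => rfl
  | cons c cs => rw [List.dropWhile_cons_of_neg]; simp [h c (by simp)]

-- preprocessing in int() is the identity on sign+digit strings
theorem pv_clean_id (l : List Char) (h : ∀ c ∈ l, c.isDigit = true ∨ c = '-') :
    (List.dropWhile PySem.Int.isIntSpace (List.dropWhile PySem.Int.isIntSpace l).reverse).reverse = l := by
  rw [pv_dropWhile_id l (fun c hc => pv_nospace c (h c hc))]
  rw [pv_dropWhile_id _ (fun c hc => pv_nospace c (h c (List.mem_reverse.mp hc)))]
  exact List.reverse_reverse l

theorem pv_digitChar_toNat (d : Nat) (h : d < 10) : (Nat.digitChar d).toNat - 48 = d := by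
  interval_cases d <;> decide

-- value of the left-to-right digit fold on str(m)
theorem pv_fold_toDigits (m : Nat) :
    (Nat.toDigits 10 m).foldl (fun a c => a * 10 + (c.toNat - 48)) 0 = m := by
  induction m using Nat.strong_induction_on with
  | _ m IH =>
    by_cases hm : m < 10
    · rw [Nat.toDigits_of_lt_base hm]
      simp [pv_digitChar_toNat m hm]
    · rw [Nat.toDigits_of_base_le (by norm_num) (by omega), List.foldl_append,
        IH (m / 10) (by omega)]
      simp [pv_digitChar_toNat (m % 10) (by omega)]
      omega

theorem pv_parse_digits (m : Nat) :
    PySem.Int.ofChars? (Nat.toDigits 10 m) = some (m : Int) ∧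
    PySem.Int.ofChars? ('-' :: Nat.toDigits 10 m) = some (-(m : Int)) := by
  obtain ⟨dv, g, hpin, hnil, hcons, hg0, hgc, hof⟩ :
      ∃ (dv : List Char → Option Nat) (g : List Char → Bool → Nat → Option Nat),
        (∀ cs : List Char, dv ('0' :: cs) = g cs true 0)
        ∧ (dv [] = none)
        ∧ (∀ c cs, dv (c :: cs) = g (c :: cs) false 0)
        ∧ (∀ b a, g [] b a = if b then some a else none)
        ∧ (∀ c rest b a, g (c :: rest) b a =
            if c.isDigit then g rest true (a * 10 + (c.toNat - '0'.toNat))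
            else if c = '_' ∧ b = true then
              (match rest with
               | d :: _ => if d.isDigit then g rest false a else none
               | [] => none)
            else none)
        ∧ (∀ s : List Char, PySem.Int.ofChars? s =
          (match (List.dropWhile PySem.Int.isIntSpace (List.dropWhile PySem.Int.isIntSpace s).reverse).reverse with
           | '-' :: ds => Option.map (fun n => -n) (do let a ← dv ds; pure ((a : Int)))
           | '+' :: ds => Option.map (fun n => n) (do let a ← dv ds; pure ((a : Int)))
           | ds => Option.map (fun n => n) (do let a ← dv ds; pure ((a : Int))))) :=
    ⟨_, _, fun cs => rfl, rfl, fun c cs => rfl, fun b a => rfl, fun c rest b a => rfl, fun s => rfl⟩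
  clear hpin
  -- the accumulator fold
  have hfold : ∀ cs : List Char, (∀ c ∈ cs, c.isDigit = true) → ∀ a : Nat,
      g cs true a = some (cs.foldl (fun a c => a * 10 + (c.toNat - 48)) a) := by
    intro cs
    induction cs with
    | nil => intro _ a; rw [hg0]; simp
    | cons c rest ih =>
      intro h a
      rw [hgc, if_pos (h c (by simp))]
      have : '0'.toNat = 48 := rfl
      rw [this, ih (fun x hx => h x (by simp [hx]))]
      simp
  have hdv : ∀ c cs, c.isDigit = true → (∀ x ∈ cs, x.isDigit = true) →
      dv (c :: cs) = some ((c :: cs).foldl (fun a x => a * 10 + (x.toNat - 48)) 0) := by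
    intro c cs hc hcs
    rw [hcons, hgc, if_pos hc, hfold cs hcs]
    simp
  -- digits of m
  have hdigs : ∀ x ∈ Nat.toDigits 10 m, x.isDigit = true :=
    fun x hx => Nat.isDigit_of_mem_toDigits (by norm_num) (by norm_num) hx
  obtain ⟨c, cs, hct⟩ : ∃ c cs, Nat.toDigits 10 m = c :: cs := by
    cases h : Nat.toDigits 10 m with
    | nil => exact absurd (h ▸ Nat.length_toDigits_pos (b := 10) (n := m)) (by simp)
    | cons c cs => exact ⟨c, cs, rfl⟩
  have hc : c.isDigit = true := hdigs c (by rw [hct]; simp)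
  have hcs : ∀ x ∈ cs, x.isDigit = true := fun x hx => hdigs x (by rw [hct]; simp [hx])
  have hfv : (c :: cs).foldl (fun a x => a * 10 + (x.toNat - 48)) 0 = m := by
    rw [← hct]; exact pv_fold_toDigits m
  constructor
  · rw [hof, hct, pv_clean_id _ (fun x hx => Or.inl (hdigs x (hct ▸ hx)))]
    have hcne : c ≠ '-' := by rintro rfl; simp [Char.isDigit] at hc
    have hcne' : c ≠ '+' := by rintro rfl; simp [Char.isDigit] at hc
    split
    · next ds heq => injection heq with h1 _; exact absurd h1 hcne
    · next ds heq => injection heq with h1 _; exact absurd h1 hcne'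
    · rw [hdv c cs hc hcs, hfv]; simp
  · rw [hof]
    rw [show ('-' :: Nat.toDigits 10 m) = '-' :: c :: cs by rw [hct]]
    rw [pv_clean_id _ ?side]
    case side =>
      intro x hx
      rcases hx with _ | hx
      · exact Or.inr rfl
      · next hx => exact Or.inl (hdigs _ (hct ▸ hx))
    split
    · next ds heq =>
        injection heq with _ h2
        subst h2
        rw [hdv c cs hc hcs, hfv]
        simp
    · next ds heq => exact absurd heq (by simp)
    · next hne _ => exact absurd rfl (hne (c :: cs))

theorem pv_parse_slice (n : Int) :
    PySem.Int.ofChars? (PySem.Chars.slice (PySem.Int.toChars n) none (some (-1))) =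
      if n.natAbs < 10 then none
      else some (if n < 0 then -((n.natAbs / 10 : Nat) : Int) else ((n.natAbs / 10 : Nat) : Int)) := by
  rw [PySem.Chars.slice_eq_listSlice, PySem.List.slice_to_neg_one]
  unfold PySem.Int.toChars
  by_cases hn : n < 0
  · rw [if_pos hn]
    by_cases ha : n.natAbs < 10
    · rw [Nat.toDigits_of_lt_base ha, if_pos ha]
      rw [show (('-' :: [Nat.digitChar n.natAbs]).dropLast) = ['-'] from rfl]
      decide
    · rw [Nat.toDigits_of_base_le (by norm_num) (by omega), if_neg ha, if_pos hn]
      rw [show ('-' :: (Nat.toDigits 10 (n.natAbs / 10) ++ [Nat.digitChar (n.natAbs % 10)]))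
            = ('-' :: Nat.toDigits 10 (n.natAbs / 10)) ++ [Nat.digitChar (n.natAbs % 10)] from rfl,
          List.dropLast_concat]
      exact (pv_parse_digits (n.natAbs / 10)).2
  · rw [if_neg hn]
    have htn : n.toNat = n.natAbs := by omega
    by_cases ha : n.natAbs < 10
    · rw [htn, Nat.toDigits_of_lt_base ha, if_pos ha]
      rw [show ([Nat.digitChar n.natAbs].dropLast) = ([] : List Char) from rfl]
      decide
    · rw [htn, Nat.toDigits_of_base_le (by norm_num) (by omega), if_neg ha, if_neg hn,
          List.dropLast_concat]
      exact (pv_parse_digits (n.natAbs / 10)).1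

-- A's `[i for i in str(n)[:-1]]` is the char list of the sliced string, and
-- `int(''.join(number))` parses it: ofChars? (exact by PySem.Int.ofStr?_ofList / toList_toStr).
def prev_mult_of_three (n : Int) : Option Int :=
  if PySem.Int.mod n 3 = 0 then some n
  else
    match h : PySem.Int.ofChars? (PySem.Chars.slice (PySem.Int.toChars n) none (some (-1))) with
    | some m => prev_mult_of_three m
    | none => none
termination_by n.natAbs
decreasing_by
  rw [pv_parse_slice] at h
  split at h
  · exact absurd h (by simp)
  · next hlt =>
      injection h with h
      rw [← h]
      split <;> omega

-- ===== PORT B =====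
def prev_mult_of_three_alt (n : Int) : Option Int :=
  if PySem.Int.mod n 3 ≠ 0 then
    if -10 < n ∧ n < 10 then none
    else
      let q := PySem.Int.floordiv |n| 10
      prev_mult_of_three_alt (if 0 < n then q else -q)
  else some n
termination_by n.natAbs
decreasing_by
  rw [PySem.Int.floordiv_eq_ediv_of_pos (by norm_num)]
  rw [Int.abs_eq_natAbs]
  split <;> omega

-- ===== PRECONDITION & SPEC =====
def Spec_prev_mult_of_three (n : Int) (out : Option Int) : Prop := out = prev_mult_of_three_alt n
instance (n : Int) (out : Option Int) : Decidable (Spec_prev_mult_of_three n out) := by unfold Spec_prev_mult_of_three; infer_instance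

-- ===== CLAIM (what is proved, stated in full; the proofs are below) =====
def Claim_equal_prev_mult_of_three : Prop := ∀ (n : Int), Dom_prev_mult_of_three n → Spec_prev_mult_of_three n (prev_mult_of_three n)

-- ===== LEMMAS AND PROOFS =====
theorem pv_eq_all (n : Int) : prev_mult_of_three n = prev_mult_of_three_alt n := by
  induction hk : n.natAbs using Nat.strong_induction_on generalizing n with
  | _ k IH =>
  subst hk
  rw [prev_mult_of_three.eq_def, prev_mult_of_three_alt.eq_def]
  by_cases h3 : PySem.Int.mod n 3 = 0
  · rw [if_pos h3, if_neg (not_not_intro h3)]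
  · rw [if_neg h3, if_pos h3]
    split
    · next m heq =>
        rw [pv_parse_slice] at heq
        split at heq
        · exact absurd heq (by simp)
        · next hsm =>
            injection heq with heq
            rw [if_neg (show ¬(-10 < n ∧ n < 10) by omega)]
            have harg : m = (if 0 < n then PySem.Int.floordiv |n| 10 else -(PySem.Int.floordiv |n| 10)) := by
              rw [PySem.Int.floordiv_eq_ediv_of_pos (by norm_num), Int.abs_eq_natAbs, ← heq]
              have hne : n ≠ 0 := by rintro rfl; exact h3 rfl
              split <;> split <;> omega
            show prev_mult_of_three m
              = prev_mult_of_three_alt (if 0 < n then PySem.Int.floordiv |n| 10 else -(PySem.Int.floordiv |n| 10))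
            rw [← harg]
            exact IH m.natAbs (by rw [← heq]; split <;> omega) m rfl
    · next heq =>
        rw [pv_parse_slice] at heq
        split at heq
        · next hsm => rw [if_pos (show (-10 < n ∧ n < 10) by omega)]
        · exact absurd heq (by simp)

-- ===== VERDICT (by name: the statement is the Claim_ definition above) =====
theorem prev_mult_of_three_spec : Claim_equal_prev_mult_of_three := by
  unfold Claim_equal_prev_mult_of_three Spec_prev_mult_of_three
  exact fun n _ => pv_eq_all n
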